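-- pv_equiv track=rewrite | github.com/YileZheng/hft-system | python/symbotoascii.py | convert_string_ascii
-- ===== SOURCE A (Python) =====
-- def bin(num: int):
-- 	if num>1:
-- 		return bin(num//2)+str(num%2)
-- 	else:
-- 		return str(num)
--
-- def bin2dec(bin: str):
-- 	dec = 0
-- 	for i in bin:
-- 		dec = dec*2 + int(i)
-- 	return dec
--
-- def convert_string_ascii(symbol: str):
-- 	size = 64
-- 	dec = 0
-- 	for c in symbol:
-- 		dec = dec*256 + ord(c)
--
-- 	pad = 8-len(symbol)
-- 	if pad > 0:
-- 		for _ in range(pad):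
-- 			dec = dec*256 + ord(' ')
--
-- 	bincode = bin(dec)
-- 	return dec, hex(dec), bin2dec(bincode[::-1]+''.join(['0']*(64-len(bincode))))
-- ===== SOURCE B (Python) =====
-- def convert_string_ascii(symbol: str):
--     data = symbol.ljust(8)
--     dec = 0
--     for c in data:
--         dec = dec * 256 + ord(c)
--     width = max(dec.bit_length(), 64)
--     rev = 0
--     for m in range(dec.bit_length()):
--         rev += ((dec // 2 ** m) % 2) * 2 ** (width - 1 - m)
--     return dec, hex(dec), rev
-- ===== Notes on version B (the rewrite author's own statement) =====
-- stated objective: simpler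
-- what changed: B pads with ljust(8) and one loop instead of a conditional pad loop, and reverses the bits arithmetically ((dec//2**m)%2 shifted to width-1-m, width = max(bit_length,64)) instead of building a recursive binary string, reversing it, right-padding with zeros and re-decoding it.
import Mathlib
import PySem

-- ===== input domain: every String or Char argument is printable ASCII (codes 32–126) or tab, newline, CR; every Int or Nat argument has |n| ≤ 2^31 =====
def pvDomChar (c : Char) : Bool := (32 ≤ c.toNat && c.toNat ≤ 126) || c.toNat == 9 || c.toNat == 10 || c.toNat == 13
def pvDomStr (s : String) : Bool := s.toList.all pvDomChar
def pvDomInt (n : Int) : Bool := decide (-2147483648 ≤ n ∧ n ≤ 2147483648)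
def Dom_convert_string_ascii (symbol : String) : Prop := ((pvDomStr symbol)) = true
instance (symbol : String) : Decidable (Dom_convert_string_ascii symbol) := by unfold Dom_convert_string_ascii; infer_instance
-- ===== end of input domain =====

-- B replaces A's binary-string build / reverse / re-decode by a direct arithmetic bit-reversal; objective: simpler.

-- ===== PORT A =====

-- helper `bin` of the module (recursive binary-string builder)
def pyBin (num : Int) : String :=
  if 1 < num then pyBin (PySem.Int.floordiv num 2) ++ PySem.Int.toStr (PySem.Int.mod num 2)
  else PySem.Int.toStr num
termination_by num.toNat
decreasing_by
  rw [PySem.Int.floordiv_eq_ediv_of_pos (by omega : (0:Int) < 2)]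
  omega

-- helper `bin2dec` of the module; int(i) on the one-char string i is PySem.Int.ofStr?;
-- the .getD 0 is only a totality guard (every char fed to it is '0' or '1', where ofStr? returns)
def pyBin2dec (bin : String) : Int :=
  bin.toList.foldl (fun dec i => dec * 2 + (PySem.Int.ofStr? (String.singleton i)).getD 0) 0

-- Python's built-in hex(): "0x" + lowercase hex digits of |d|, sign in front (hand port, exact for all Int)
def pyHexDig (n : Nat) : Char := if n < 10 then Char.ofNat (48 + n) else Char.ofNat (87 + n)

def pyHexDigits (n : Nat) : List Char :=
  if n < 16 then [pyHexDig n] else pyHexDigits (n / 16) ++ [pyHexDig (n % 16)]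
termination_by n
decreasing_by omega

def pyHex (d : Int) : String := (if d < 0 then "-0x" else "0x") ++ String.ofList (pyHexDigits d.natAbs)

def convert_string_ascii (symbol : String) : Int × String × Int :=
  let dec0 : Int := symbol.toList.foldl (fun dec c => dec * 256 + (c.toNat : Int)) 0
  let pad : Int := 8 - PySem.Str.len symbol
  let dec : Int :=
    if 0 < pad then (PySem.List.pyRange 0 pad 1).foldl (fun dec _ => dec * 256 + ((' ').toNat : Int)) dec0
    else dec0
  let bincode : String := pyBin dec
  -- bincode[::-1]: step -1 slice; .getD "" is a totality guard (step ≠ 0, so slice? always returns)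
  let revcode : String := (PySem.Str.slice? bincode none none (-1)).getD ""
  -- ''.join(['0']*(64-len(bincode))): a negative count gives the empty list, exactly as .toNat does
  (dec, pyHex dec, pyBin2dec (revcode ++ String.ofList (List.replicate (64 - PySem.Str.len bincode).toNat '0')))

-- ===== PORT B =====

def convert_string_ascii_alt (symbol : String) : Int × String × Int :=
  -- symbol.ljust(8): pad on the right with spaces to length 8 (no-op if already ≥ 8)
  let data : List Char := symbol.toList ++ List.replicate (8 - symbol.toList.length) ' '
  let dec : Int := data.foldl (fun dec c => dec * 256 + (c.toNat : Int)) 0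
  let bl : Nat := PySem.Int.bitLength dec
  let width : Nat := max bl 64
  -- m ranges over 0..bl-1, so m.toNat is exact; width-1-m never underflows (m < bl ≤ width, 64 ≤ width)
  let rev : Int := (PySem.List.pyRange 0 (bl : Int) 1).foldl
    (fun rev m => rev + PySem.Int.mod (PySem.Int.floordiv dec (2 ^ m.toNat)) 2 * 2 ^ (width - 1 - m.toNat)) 0
  (dec, pyHex dec, rev)

-- ===== PRECONDITION & SPEC =====
def Spec_convert_string_ascii (symbol : String) (out : Int × String × Int) : Prop := out = convert_string_ascii_alt symbol
instance (symbol : String) (out : Int × String × Int) : Decidable (Spec_convert_string_ascii symbol out) := by unfold Spec_convert_string_ascii; infer_instance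

-- ===== CLAIM (what is proved, stated in full; the proofs are below) =====
def Claim_equal_convert_string_ascii : Prop := ∀ (symbol : String), Dom_convert_string_ascii symbol → Spec_convert_string_ascii symbol (convert_string_ascii symbol)

-- ===== LEMMAS AND PROOFS =====

-- value of the bit-reversal of n (LSB of n becomes the MSB), bit_length(n) bits wide
def Rspec (n : Nat) : Int :=
  if 1 < n then ((n % 2 : Nat) : Int) * 2 ^ (PySem.Int.bitLength (n : Int) - 1) + Rspec (n / 2)
  else (n : Int)
termination_by n
decreasing_by omega


lemma val_zero : (PySem.Int.ofStr? (String.singleton '0')).getD 0 = (0 : Int) := by decide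

lemma val_one : (PySem.Int.ofStr? (String.singleton '1')).getD 0 = (1 : Int) := by decide

-- appending k '0'-digits multiplies the bin2dec accumulator by 2^k
lemma zerosFold : ∀ (k : Nat) (a : Int),
    (List.replicate k '0').foldl (fun dec i => dec * 2 + (PySem.Int.ofStr? (String.singleton i)).getD 0) a
      = a * 2 ^ k := by
  intro k
  induction k with
  | zero => intro a; simp
  | succ k ih =>
    intro a
    rw [List.replicate_succ, List.foldl_cons, ih, val_zero]
    ring

-- the binary string A builds for n ≥ 1 has exactly bit_length(n) characters
lemma binLen : ∀ n : Nat, 0 < n → (pyBin (n : Int)).toList.length = PySem.Int.bitLength (n : Int) := by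
  intro n
  induction n using Nat.strong_induction_on with
  | _ n ih =>
    intro hn
    rw [pyBin]
    by_cases h : 1 < n
    · have hdiv : PySem.Int.floordiv (n : Int) 2 = ((n / 2 : Nat) : Int) := by
        exact_mod_cast PySem.Int.floordiv_natCast n 2
      have hmod : PySem.Int.mod (n : Int) 2 = ((n % 2 : Nat) : Int) := by
        exact_mod_cast PySem.Int.mod_natCast n 2
      rw [if_pos (by exact_mod_cast h), hdiv, hmod,
        PySem.Int.bitLength_natCast (show 0 < n by omega)]
      have hlen2 : (PySem.Int.toStr ((n % 2 : Nat) : Int)).toList.length = 1 := by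
        rcases Nat.mod_two_eq_zero_or_one n with h2 | h2 <;> rw [h2] <;> decide
      rw [String.toList_append, List.length_append, hlen2, ih (n / 2) (by omega) (by omega)]
    · have hn1 : n = 1 := by omega
      subst hn1
      rw [if_neg (by norm_num)]
      decide

-- bin2dec of the reversed binary string: accumulator law
lemma binFold : ∀ n : Nat, 0 < n → ∀ a : Int,
    ((pyBin (n : Int)).toList.reverse).foldl
        (fun dec i => dec * 2 + (PySem.Int.ofStr? (String.singleton i)).getD 0) a
      = a * 2 ^ (PySem.Int.bitLength (n : Int)) + Rspec n := by
  intro n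
  induction n using Nat.strong_induction_on with
  | _ n ih =>
    intro hn a
    rw [pyBin, Rspec]
    by_cases h : 1 < n
    · have hdiv : PySem.Int.floordiv (n : Int) 2 = ((n / 2 : Nat) : Int) := by
        exact_mod_cast PySem.Int.floordiv_natCast n 2
      have hmod : PySem.Int.mod (n : Int) 2 = ((n % 2 : Nat) : Int) := by
        exact_mod_cast PySem.Int.mod_natCast n 2
      have hBL := PySem.Int.bitLength_natCast (show 0 < n by omega)
      rw [if_pos (by exact_mod_cast h), if_pos h, hdiv, hmod]
      have hdig : (PySem.Int.toStr ((n % 2 : Nat) : Int)).toList.reverse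
          = [if n % 2 = 1 then '1' else '0'] := by
        rcases Nat.mod_two_eq_zero_or_one n with h2 | h2 <;> rw [h2] <;> decide
      rw [String.toList_append, List.reverse_append, hdig, List.singleton_append,
        List.foldl_cons, ih (n / 2) (by omega) (by omega), hBL]
      have hval : (PySem.Int.ofStr? (String.singleton (if n % 2 = 1 then '1' else '0'))).getD 0
          = ((n % 2 : Nat) : Int) := by
        rcases Nat.mod_two_eq_zero_or_one n with h2 | h2 <;> rw [h2] <;> decide
      rw [hval]
      have : PySem.Int.bitLength ((n / 2 : Nat) : Int) + 1 - 1
          = PySem.Int.bitLength ((n / 2 : Nat) : Int) := by omega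
      rw [this]
      ring
    · have hn1 : n = 1 := by omega
      subst hn1
      rw [if_neg (by norm_num), if_neg (by norm_num)]
      show (PySem.Int.toStr 1).toList.reverse.foldl _ a = _
      have : (PySem.Int.toStr (1 : Int)).toList.reverse = ['1'] := by decide
      rw [this, List.foldl_cons, List.foldl_nil, val_one]
      have : PySem.Int.bitLength ((1 : Nat) : Int) = 1 := by decide
      rw [this]
      ring

-- B's shift/mask accumulation loop computes the bit-reversal value
lemma revFold : ∀ n : Nat, 0 < n → ∀ W : Nat, PySem.Int.bitLength (n : Int) ≤ W → ∀ r : Int,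
    (List.range (PySem.Int.bitLength (n : Int))).foldl
        (fun acc m => acc + ((n / 2 ^ m % 2 : Nat) : Int) * 2 ^ (W - 1 - m)) r
      = r + Rspec n * 2 ^ (W - PySem.Int.bitLength (n : Int)) := by
  intro n
  induction n using Nat.strong_induction_on with
  | _ n ih =>
    intro hn W hW r
    rw [Rspec]
    by_cases h : 1 < n
    · have hBL := PySem.Int.bitLength_natCast (show 0 < n by omega)
      rw [if_pos h, hBL, List.range_succ_eq_map, List.foldl_cons, List.foldl_map]
      have hfun : (fun (acc : Int) (m : Nat) => acc + ((n / 2 ^ (m + 1) % 2 : Nat) : Int) * 2 ^ (W - 1 - (m + 1)))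
          = fun (acc : Int) (m : Nat) => acc + (((n / 2) / 2 ^ m % 2 : Nat) : Int) * 2 ^ ((W - 1) - 1 - m) := by
        funext acc m
        have h1 : n / 2 ^ (m + 1) = (n / 2) / 2 ^ m := by
          rw [pow_succ']
          rw [Nat.div_div_eq_div_mul]
        have h2 : W - 1 - (m + 1) = (W - 1) - 1 - m := by omega
        rw [h1, h2]
      simp only [pow_zero, Nat.div_one, Nat.sub_zero]
      rw [hfun, ih (n / 2) (by omega) (by omega) (W - 1) (by omega)]
      have e1 : (W - 1) - PySem.Int.bitLength ((n / 2 : Nat) : Int)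
          = W - (PySem.Int.bitLength ((n / 2 : Nat) : Int) + 1) := by omega
      have e2 : PySem.Int.bitLength ((n / 2 : Nat) : Int) + 1 - 1
          = PySem.Int.bitLength ((n / 2 : Nat) : Int) := by omega
      rw [e1, e2]
      have e3 : (2 : Int) ^ (W - 1)
          = 2 ^ (PySem.Int.bitLength ((n / 2 : Nat) : Int)) * 2 ^ (W - (PySem.Int.bitLength ((n / 2 : Nat) : Int) + 1)) := by
        rw [← pow_add]
        congr 1
        omega
      rw [e3]
      ring
    · have hn1 : n = 1 := by omega
      subst hn1
      rw [if_neg (by norm_num)]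
      have hb1 : PySem.Int.bitLength ((1 : Nat) : Int) = 1 := by decide
      rw [hb1, List.range_one, List.foldl_cons, List.foldl_nil]
      norm_num

-- the base-256 accumulator stays ≥ 1 once it is ≥ 1
lemma foldGeOne : ∀ (l : List Char) (a : Int), 1 ≤ a →
    1 ≤ l.foldl (fun dec c => dec * 256 + (c.toNat : Int)) a := by
  intro l
  induction l with
  | nil => intro a ha; simpa using ha
  | cons c cs ih =>
    intro a ha
    rw [List.foldl_cons]
    exact ih _ (by have := Int.natCast_nonneg c.toNat; omega)

-- A's range-pad loop is B's fold over the replicated spaces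
lemma padFold : ∀ (k : Nat) (a : Int),
    (PySem.List.pyRange 0 (k : Int) 1).foldl (fun dec _ => dec * 256 + ((' ').toNat : Int)) a
      = (List.replicate k ' ').foldl (fun dec c => dec * 256 + (c.toNat : Int)) a := by
  intro k
  induction k with
  | zero => intro a; rw [PySem.List.pyRange_one_eq_nil (by norm_num)]; rfl
  | succ k ih =>
    intro a
    have hc : ((k + 1 : Nat) : Int) = (k : Int) + 1 := by push_cast; ring
    rw [hc, PySem.List.pyRange_one_succ_right (by positivity), List.foldl_append,
      List.replicate_succ', List.foldl_append, ih]
    simp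

-- the two padding styles produce the same dec
lemma decBothEq (cs : List Char) :
    (if 0 < 8 - (cs.length : Int) then
        (PySem.List.pyRange 0 (8 - (cs.length : Int)) 1).foldl (fun dec _ => dec * 256 + ((' ').toNat : Int))
          (cs.foldl (fun dec c => dec * 256 + (c.toNat : Int)) 0)
      else cs.foldl (fun dec c => dec * 256 + (c.toNat : Int)) 0)
      = (cs ++ List.replicate (8 - cs.length) ' ').foldl (fun dec c => dec * 256 + (c.toNat : Int)) 0 := by
  rw [List.foldl_append]
  by_cases h : 0 < 8 - (cs.length : Int)
  · rw [if_pos h]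
    have hk : 8 - (cs.length : Int) = ((8 - cs.length : Nat) : Int) := by omega
    rw [hk, padFold]
  · rw [if_neg h]
    have hk : 8 - cs.length = 0 := by omega
    rw [hk]
    simp

-- the whole third components agree for any dec ≥ 1
lemma thirdEq (d : Int) (hd : 1 ≤ d) :
    pyBin2dec ((PySem.Str.slice? (pyBin d) none none (-1)).getD "" ++
        String.ofList (List.replicate ((64 : Int) - ((pyBin d).toList.length : Int)).toNat '0'))
      = (PySem.List.pyRange 0 ((PySem.Int.bitLength d : Nat) : Int) 1).foldl
          (fun rev m => rev + PySem.Int.mod (PySem.Int.floordiv d (2 ^ m.toNat)) 2 *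
            2 ^ (max (PySem.Int.bitLength d) 64 - 1 - m.toNat)) 0 := by
  obtain ⟨n, rfl⟩ : ∃ n : Nat, d = (n : Int) := ⟨d.toNat, (Int.toNat_of_nonneg (by omega)).symm⟩
  have hn : 0 < n := by exact_mod_cast hd
  -- left side
  rw [pyBin2dec, PySem.Str.slice?_none_none_neg_one, Option.getD_some, String.toList_append,
    String.toList_ofList, String.toList_ofList, List.foldl_append, zerosFold,
    binFold n hn 0, binLen n hn]
  -- right side
  rw [PySem.List.pyRange_one, List.foldl_map]
  have hfun : (fun (acc : Int) (k : Nat) => (fun (rev : Int) (m : Int) =>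
        rev + PySem.Int.mod (PySem.Int.floordiv (n : Int) (2 ^ m.toNat)) 2 *
          2 ^ (max (PySem.Int.bitLength (n : Int)) 64 - 1 - m.toNat)) acc ((0 : Int) + (k : Int)))
      = fun (acc : Int) (m : Nat) => acc + ((n / 2 ^ m % 2 : Nat) : Int) *
          2 ^ (max (PySem.Int.bitLength (n : Int)) 64 - 1 - m) := by
    funext acc k
    have h2 : ((2 : Int) ^ k) = ((2 ^ k : Nat) : Int) := by push_cast; ring
    have h3 : PySem.Int.floordiv (n : Int) ((2 ^ k : Nat) : Int) = ((n / 2 ^ k : Nat) : Int) :=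
      PySem.Int.floordiv_natCast n (2 ^ k)
    have h4 : PySem.Int.mod ((n / 2 ^ k : Nat) : Int) 2 = ((n / 2 ^ k % 2 : Nat) : Int) := by
      exact_mod_cast PySem.Int.mod_natCast (n / 2 ^ k) 2
    simp only [zero_add, Int.toNat_natCast, h2, h3, h4]
  have hlen : ((PySem.Int.bitLength (n : Int) : Nat) : Int) - 0 = ((PySem.Int.bitLength (n : Int) : Nat) : Int) := by ring
  rw [hlen, Int.toNat_natCast, hfun, revFold n hn (max (PySem.Int.bitLength (n : Int)) 64) (le_max_left _ _) 0]
  have ht : ((64 : Int) - ((PySem.Int.bitLength (n : Int) : Nat) : Int)).toNat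
      = 64 - PySem.Int.bitLength (n : Int) := by omega
  have hmax : max (PySem.Int.bitLength (n : Int)) 64 - PySem.Int.bitLength (n : Int)
      = 64 - PySem.Int.bitLength (n : Int) := by omega
  rw [ht, hmax]
  ring

-- under Dom every character code is ≥ 9, so dec ≥ 1
lemma decGeOne (symbol : String) (hdom : Dom_convert_string_ascii symbol) :
    1 ≤ (symbol.toList ++ List.replicate (8 - symbol.toList.length) ' ').foldl
        (fun dec c => dec * 256 + (c.toNat : Int)) 0 := by
  rcases hcs : symbol.toList with _ | ⟨c, cs⟩
  · simp only [List.nil_append, List.length_nil, Nat.sub_zero]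
    rw [List.replicate_succ, List.foldl_cons]
    exact foldGeOne _ _ (by decide)
  · have hc : pvDomChar c = true := by
      have : ∀ x ∈ symbol.toList, pvDomChar x = true := List.all_eq_true.mp hdom
      exact this c (by rw [hcs]; exact List.mem_cons_self)
    have hc9 : 9 ≤ c.toNat := by
      simp only [pvDomChar, Bool.or_eq_true, Bool.and_eq_true, decide_eq_true_eq, beq_iff_eq] at hc
      omega
    rw [List.cons_append, List.foldl_cons]
    exact foldGeOne _ _ (by omega)

theorem convert_string_ascii_spec : Claim_equal_convert_string_ascii := by
  intro symbol hdom
  show convert_string_ascii symbol = convert_string_ascii_alt symbol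
  have hd := decGeOne symbol hdom
  simp only [convert_string_ascii, convert_string_ascii_alt, PySem.Str.len_eq]
  rw [decBothEq symbol.toList]
  exact Prod.ext rfl (Prod.ext rfl (by rw [thirdEq _ hd]))
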